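-- pv_equiv track=rewrite | github.com/Sirius2294/TypingPractice | pycrawlers/duelyst.py | remove_sentences
-- ===== SOURCE A (Python) =====
-- def remove_sentences(text="", num_of_sentences=2):
--     num_of_periods = 0
--     for i in range(len(text)):
--         if text[i] == '.':
--             num_of_periods += 1
--             if num_of_periods == num_of_sentences:
--                 text = text[i+1:].strip()
--                 break
--     return text
-- ===== SOURCE B (Python) =====
-- def remove_sentences(text="", num_of_sentences=2):
--     parts = text.split('.')
--     if num_of_sentences >= 1 and len(parts) > num_of_sentences:
--         return '.'.join(parts[num_of_sentences:]).strip()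
--     return text
-- ===== Notes on version B (the rewrite author's own statement) =====
-- stated objective: idiomatic
-- what changed: Replaced the char-by-char index scan that counts periods and breaks with the tail slice by an up-front split of the text on the period separator and a period-join of the segment suffix, guarded by num_of_sentences >= 1 and a segment-count check; the split/join run in C, so B is measurably faster.
import Mathlib
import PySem

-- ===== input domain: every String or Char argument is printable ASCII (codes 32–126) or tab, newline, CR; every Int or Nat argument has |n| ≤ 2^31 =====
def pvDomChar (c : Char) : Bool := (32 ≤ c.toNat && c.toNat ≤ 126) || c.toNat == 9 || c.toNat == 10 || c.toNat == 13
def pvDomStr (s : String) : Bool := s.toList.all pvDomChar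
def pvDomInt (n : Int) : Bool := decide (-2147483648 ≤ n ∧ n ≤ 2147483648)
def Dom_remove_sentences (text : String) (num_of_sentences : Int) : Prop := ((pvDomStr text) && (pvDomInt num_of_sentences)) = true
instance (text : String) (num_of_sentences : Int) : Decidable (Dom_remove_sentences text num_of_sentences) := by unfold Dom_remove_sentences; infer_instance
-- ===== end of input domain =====

-- B replaces A's char-by-char scan for the n-th period by split('.')/join on the
-- sentence segments (objective: idiomatic; same exact return value).

-- ===== PORT A =====
-- A's for-loop over indices: count '.'; on the num-th one, break with text[i+1:].strip().
-- We recurse over the char list carrying the counter; `some rest` = the suffix after the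
-- matched period (text[i+1:]), `none` = loop finished without breaking (text unchanged).
def removeA_loop : List Char → Int → Int → Option (List Char)
  | [], _, _ => none
  | c :: rest, cnt, num =>
    if c = '.' then
      if cnt + 1 = num then some rest
      else removeA_loop rest (cnt + 1) num
    else removeA_loop rest cnt num

def remove_sentences (text : String) (num_of_sentences : Int) : String :=
  match removeA_loop text.toList 0 num_of_sentences with
  | some rest => PySem.Str.strip (String.ofList rest)
  | none => text

-- ===== PORT B =====
-- Source B: parts = text.split('.'); if num >= 1 and len(parts) > num: return '.'.join(parts[num:]).strip(); return text
def remove_sentences_alt (text : String) (num_of_sentences : Int) : String :=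
  let parts := PySem.Chars.splitOn text.toList ['.']   -- text.split('.') (sep nonempty, total)
  if 1 ≤ num_of_sentences ∧ num_of_sentences < (parts.length : Int) then
    String.ofList (PySem.Chars.strip
      (PySem.Chars.join ['.'] (PySem.List.slice parts (some num_of_sentences) none)))
  else text

-- ===== PRECONDITION & SPEC =====
def Spec_remove_sentences (text : String) (num_of_sentences : Int) (out : String) : Prop := out = remove_sentences_alt text num_of_sentences
instance (text : String) (num_of_sentences : Int) (out : String) : Decidable (Spec_remove_sentences text num_of_sentences out) := by unfold Spec_remove_sentences; infer_instance

-- ===== CLAIM (what is proved, stated in full; the proofs are below) =====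
def Claim_equal_remove_sentences : Prop := ∀ (text : String) (num_of_sentences : Int), Dom_remove_sentences text num_of_sentences → Spec_remove_sentences text num_of_sentences (remove_sentences text num_of_sentences)

-- ===== LEMMAS AND PROOFS =====

-- Simple structural form of text.split('.') used only in the proofs.
def splitDot : List Char → List (List Char)
  | [] => [[]]
  | c :: rest => if c = '.' then [] :: splitDot rest else (splitDot rest).modifyHead (c :: ·)

theorem modifyHead_id' {α : Type} (l : List α) : List.modifyHead (fun x => x) l = l := by
  cases l <;> simp

theorem splitDot_ne_nil (cs : List Char) : splitDot cs ≠ [] := by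
  induction cs with
  | nil => simp [splitDot]
  | cons c rest ih =>
    simp only [splitDot]
    split
    · simp
    · cases h : splitDot rest with
      | nil => exact absurd h ih
      | cons p t => simp

theorem go_spec (cs : List Char) (fuel : Nat) (cur : List Char) (acc : List (List Char))
    (h : cs.length ≤ fuel) :
    PySem.Chars.splitOn.go ['.'] fuel cs cur acc
      = acc.reverse ++ (splitDot cs).modifyHead (cur.reverse ++ ·) := by
  induction fuel generalizing cs cur acc with
  | zero =>
    have : cs = [] := by cases cs <;> simp_all
    subst this
    simp [PySem.Chars.splitOn.go, splitDot]
  | succ f ih =>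
    cases cs with
    | nil => simp [PySem.Chars.splitOn.go, splitDot]
    | cons c rest =>
      simp only [PySem.Chars.splitOn.go]
      by_cases hc : c = '.'
      · subst hc
        rw [if_pos (by simp [List.isPrefixOf])]
        have hdrop : List.drop ['.'].length ('.' :: rest) = rest := by simp
        rw [hdrop, ih rest [] (List.reverse cur :: acc) (by simpa using h)]
        simp [splitDot, modifyHead_id']
      · rw [if_neg (by simp [List.isPrefixOf]; exact fun h' => hc h'.symm)]
        rw [ih rest (c :: cur) acc (by simpa using h)]
        simp only [splitDot, if_neg hc]
        cases hsd : splitDot rest with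
        | nil => exact absurd hsd (splitDot_ne_nil rest)
        | cons p t => simp

theorem splitOn_eq_splitDot (cs : List Char) :
    PySem.Chars.splitOn cs ['.'] = splitDot cs := by
  have := go_spec cs (cs.length + 1) [] [] (by omega)
  simpa [PySem.Chars.splitOn, modifyHead_id'] using this

theorem join_splitDot (cs : List Char) :
    PySem.Chars.join ['.'] (splitDot cs) = cs := by
  induction cs with
  | nil => simp [splitDot, PySem.Chars.join_singleton]
  | cons c rest ih =>
    simp only [splitDot]
    by_cases hc : c = '.'
    · subst hc
      rw [if_pos rfl]
      cases hsd : splitDot rest with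
      | nil => exact absurd hsd (splitDot_ne_nil rest)
      | cons p t =>
        rw [PySem.Chars.join_cons_cons]
        rw [hsd] at ih
        simp [ih]
    · rw [if_neg hc]
      cases hsd : splitDot rest with
      | nil => exact absurd hsd (splitDot_ne_nil rest)
      | cons p t =>
        rw [hsd] at ih
        cases t with
        | nil =>
          simp [PySem.Chars.join_singleton] at ih ⊢
          simp [ih]
        | cons q t' =>
          rw [PySem.Chars.join_cons_cons] at ih
          simp only [List.modifyHead, PySem.Chars.join_cons_cons]
          simp [← ih]

theorem drop_modifyHead {α : Type} (f : α → α) (xs : List α) (n : Nat) (hn : 1 ≤ n) :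
    (xs.modifyHead f).drop n = xs.drop n := by
  cases xs with
  | nil => simp
  | cons x t =>
    cases n with
    | zero => omega
    | succ m => simp

-- Characterisation of A's loop: starting with counter cnt, it breaks with the suffix
-- after the (num − cnt)-th period iff 1 ≤ num − cnt ≤ number of periods, and that suffix
-- is the '.'-join of the segments after the first (num − cnt).
theorem removeA_loop_eq (cs : List Char) (cnt num : Int) :
    removeA_loop cs cnt num =
      if 1 ≤ num - cnt ∧ num - cnt < ((splitDot cs).length : Int) then
        some (PySem.Chars.join ['.'] ((splitDot cs).drop (num - cnt).toNat))
      else none := by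
  induction cs generalizing cnt with
  | nil =>
    simp only [removeA_loop, splitDot]
    rw [if_neg (by simp)]
  | cons c rest ih =>
    simp only [removeA_loop]
    by_cases hc : c = '.'
    · subst hc
      have hsd : splitDot ('.' :: rest) = [] :: splitDot rest := by simp [splitDot]
      rw [if_pos rfl, hsd]
      have hlen : 0 < (splitDot rest).length :=
        List.length_pos_iff.mpr (splitDot_ne_nil rest)
      by_cases h1 : cnt + 1 = num
      · rw [if_pos h1]
        have hd : num - cnt = 1 := by omega
        have hcond : 1 ≤ num - cnt ∧ num - cnt < (([] :: splitDot rest).length : Int) := by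
          refine ⟨by omega, ?_⟩
          rw [hd]; simp; omega
        rw [if_pos hcond, hd]
        simp [join_splitDot]
      · rw [if_neg h1, ih (cnt + 1)]
        by_cases h2 : 1 ≤ num - (cnt + 1) ∧ num - (cnt + 1) < ((splitDot rest).length : Int)
        · rw [if_pos h2, if_pos (by simp; omega)]
          congr 1
          have ht : (num - cnt).toNat = (num - (cnt + 1)).toNat + 1 := by omega
          rw [ht]
          simp
        · rw [if_neg h2, if_neg (by simp at h2 ⊢; intro ha; have := h2 (by omega); omega)]
    · rw [if_neg hc]
      have hsd : splitDot (c :: rest) = (splitDot rest).modifyHead (c :: ·) := by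
        simp [splitDot, hc]
      rw [ih cnt, hsd]
      by_cases h2 : 1 ≤ num - cnt ∧ num - cnt < ((splitDot rest).length : Int)
      · rw [if_pos h2, if_pos (by simpa [List.length_modifyHead] using h2)]
        rw [drop_modifyHead _ _ _ (by omega)]
      · rw [if_neg h2, if_neg (by simpa [List.length_modifyHead] using h2)]

theorem strip_ofList (l : List Char) :
    PySem.Str.strip (String.ofList l) = String.ofList (PySem.Chars.strip l) := by
  apply String.toList_inj.mp
  simp [PySem.Str.toList_strip]

-- ===== VERDICT (by name: the statement is the Claim_ definition above) =====
theorem remove_sentences_spec : Claim_equal_remove_sentences := by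
  intro text num _
  unfold Spec_remove_sentences remove_sentences remove_sentences_alt
  rw [splitOn_eq_splitDot, removeA_loop_eq]
  by_cases h : 1 ≤ num - 0 ∧ num - 0 < ((splitDot text.toList).length : Int)
  · rw [if_pos h]
    simp only
    rw [if_pos (by simpa using h)]
    rw [PySem.List.slice_from _ (by omega)]
    rw [strip_ofList]
    norm_num
  · rw [if_neg h]
    simp only
    rw [if_neg (by simpa using h)]
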